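-- pv_equiv track=rewrite | github.com/nicoletanyt/AOC | 2024/DAY 3/part2.py | returnInstructions
-- ===== SOURCE A (Python) =====
-- def returnInstructions(current_string: str):
--     while True:
--         dont_index = current_string.find("don't()")
--         if dont_index == -1:
--             return current_string
--         else:
--             # find the next do_index to see if it ever gets enabled again
--             string_copy = current_string[dont_index + 8:] # start looping 7 characters (don't()) after
--             do_index = string_copy.find("do()")
--             if do_index == -1:
--                 # rest of the string doesn't matter
--                 return current_string[:dont_index]
--             else:
--                 # remove the part between dont() and do()
--                 current_string = current_string[:dont_index] + current_string[dont_index + 7 + do_index + 5:] # exclude the 4 do() characters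
-- ===== SOURCE B (Python) =====
-- def returnInstructions(current_string: str):
--     # Single left-to-right pass with an output stack: push characters, and when the
--     # output ends with "don't()" pop the marker and fast-forward the input to just
--     # past the next "do()" (searched from one character after the marker, matching
--     # the original's offset arithmetic).  One pass instead of repeated re-scan+splice.
--     out = []
--     i = 0
--     n = len(current_string)
--     while i < n:
--         out.append(current_string[i])
--         i += 1
--         if len(out) >= 7 and "".join(out[-7:]) == "don't()":
--             del out[-7:]
--             j = current_string.find("do()", i + 1)
--             if j == -1:
--                 return "".join(out)
--             i = j + 4
--     return "".join(out)
-- ===== Notes on version B (the rewrite author's own statement) =====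
-- stated objective: alternative
-- what changed: Replaced the repeated find-and-splice loop (which rebuilds the whole string on every disabled region) by a single left-to-right scan with an output stack that detects the closing marker as a suffix of the output and fast-forwards past the next enabling marker with the same offset arithmetic; worst-case cost drops from quadratic to linear, though on marker-sparse input plain Python loses to A's C-level find/slice.
import Mathlib
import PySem

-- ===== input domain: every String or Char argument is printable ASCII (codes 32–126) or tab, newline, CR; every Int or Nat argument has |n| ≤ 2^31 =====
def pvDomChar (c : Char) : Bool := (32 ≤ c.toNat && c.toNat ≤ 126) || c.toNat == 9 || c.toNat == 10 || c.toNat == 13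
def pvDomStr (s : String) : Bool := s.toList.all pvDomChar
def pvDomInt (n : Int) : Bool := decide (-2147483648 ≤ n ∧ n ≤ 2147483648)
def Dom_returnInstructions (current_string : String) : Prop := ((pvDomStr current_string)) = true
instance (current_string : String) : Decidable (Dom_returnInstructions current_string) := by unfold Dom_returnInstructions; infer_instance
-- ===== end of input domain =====

-- B replaces A's repeated find-and-splice rebuilding of the string by one left-to-right
-- scan with an output stack (same offset arithmetic): a structurally different, single-pass
-- algorithm; equality of the return values is proved below.

-- ===== PORT A =====
-- literal transliteration of A's while-True loop; terminates because each splice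
-- removes at least 12 characters (proved in decreasing_by)
def returnInstructionsLoop (cur : List Char) : List Char :=
  let dont_index := PySem.Chars.find cur "don't()".toList
  if _h1 : dont_index = -1 then cur
  else
    let string_copy := PySem.Chars.slice cur (some (dont_index + 8)) none
    let do_index := PySem.Chars.find string_copy "do()".toList
    if _h2 : do_index = -1 then
      PySem.Chars.slice cur none (some dont_index)
    else
      returnInstructionsLoop (PySem.Chars.slice cur none (some dont_index) ++
        PySem.Chars.slice cur (some (dont_index + 7 + do_index + 5)) none)
termination_by cur.length
decreasing_by
  have hd0 : (0:Int) ≤ PySem.Chars.find cur "don't()".toList := by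
    rcases lt_or_eq_of_le (PySem.Chars.neg_one_le_find cur "don't()".toList) with h | h
    · omega
    · exact absurd h.symm _h1
  obtain ⟨hdp, -⟩ := PySem.Chars.find_spec hd0
  have hdlen : (PySem.Chars.find cur "don't()".toList).toNat + 7 ≤ cur.length := by
    have := hdp.length_le
    rw [List.length_drop] at this
    have h7 : ("don't()".toList).length = 7 := by decide
    omega
  set d := (PySem.Chars.find cur "don't()".toList).toNat
  have hdeq : PySem.Chars.find cur "don't()".toList = (d : Int) := by omega
  have he0 : (0:Int) ≤ PySem.Chars.find string_copy "do()".toList := by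
    rcases lt_or_eq_of_le (PySem.Chars.neg_one_le_find string_copy "do()".toList) with h | h
    · omega
    · exact absurd h.symm _h2
  obtain ⟨hep, -⟩ := PySem.Chars.find_spec he0
  set e := (PySem.Chars.find string_copy "do()".toList).toNat
  have heeq : PySem.Chars.find string_copy "do()".toList = (e : Int) := by omega
  show (PySem.Chars.slice cur none (some (PySem.Chars.find cur "don't()".toList)) ++
      PySem.Chars.slice cur (some (PySem.Chars.find cur "don't()".toList + 7 +
        PySem.Chars.find string_copy "do()".toList + 5)) none).length < cur.length
  rw [hdeq, heeq]
  have h1 : PySem.Chars.slice cur none (some ((d:Int))) = cur.take d := by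
    rw [PySem.Chars.slice_eq_listSlice, PySem.List.slice_to_natCast]
  have h2 : ((d:Int) + 7 + (e:Int) + 5) = ((d + 12 + e : Nat) : Int) := by push_cast; ring
  have h3 : PySem.Chars.slice cur (some ((d:Int) + 7 + (e:Int) + 5)) none = cur.drop (d + 12 + e) := by
    rw [h2, PySem.Chars.slice_eq_listSlice, PySem.List.slice_from_natCast]
  rw [h1, h3]
  simp only [List.length_append, List.length_take, List.length_drop]
  omega

def returnInstructions (current_string : String) : String :=
  String.ofList (returnInstructionsLoop current_string.toList)

-- ===== PORT B =====
-- literal transliteration of Source B's single scan: i is the index BEFORE the Python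
-- 'i += 1', so the do()-search start 'i + 1' of Source B is '(i : Int) + 2' here;
-- out[-7:] and out[:-7] are the corresponding slices.
-- lower bound for findFrom, cited by the port's decreasing_by
theorem pvFindFromLB (s sub : List Char) (k : Nat)
    (h : PySem.Chars.findFrom s sub (k : Int) none ≠ -1) :
    k ≤ s.length ∧ (k : Int) ≤ PySem.Chars.findFrom s sub (k : Int) none := by
  by_cases hk : k ≤ s.length
  · exact ⟨hk, (PySem.Chars.findFrom_natCast_spec s sub k hk h).1⟩
  · exfalso
    apply h
    simp only [PySem.Chars.findFrom]
    rw [if_neg (by omega : ¬((k : Int) < 0)), if_pos (by omega : (s.length : Int) < (k : Int))]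

def returnInstructionsAltLoop (s : List Char) (i : Nat) (out : List Char) : List Char :=
  if h : i < s.length then
    let out' := out ++ [s[i]]
    if 7 ≤ out'.length ∧ PySem.List.slice out' (some (-7 : Int)) none = "don't()".toList then
      let out'' := PySem.List.slice out' none (some (-7 : Int))
      let j := PySem.Chars.findFrom s "do()".toList ((i : Int) + 2) none
      if _hj : j = -1 then out''
      else returnInstructionsAltLoop s (j.toNat + 4) out''
    else returnInstructionsAltLoop s (i + 1) out'
  else out
termination_by s.length - i
decreasing_by
  · have hcast : ((i : Int) + 2) = ((i + 2 : Nat) : Int) := by push_cast; ring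
    have hb := pvFindFromLB s "do()".toList (i + 2) (by rw [← hcast]; exact _hj)
    rw [← hcast] at hb
    omega
  · omega

def returnInstructions_alt (current_string : String) : String :=
  String.ofList (returnInstructionsAltLoop current_string.toList 0 [])

-- ===== PRECONDITION & SPEC =====
def Spec_returnInstructions (current_string : String) (out : String) : Prop := out = returnInstructions_alt current_string
instance (current_string : String) (out : String) : Decidable (Spec_returnInstructions current_string out) := by unfold Spec_returnInstructions; infer_instance

-- ===== CLAIM (what is proved, stated in full; the proofs are below) =====
def Claim_equal_returnInstructions : Prop := ∀ (current_string : String), Dom_returnInstructions current_string → Spec_returnInstructions current_string (returnInstructions current_string)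

-- ===== LEMMAS AND PROOFS =====

-- a prefix of (xs ++ ys).drop q that fits inside xs is a prefix of xs.drop q
theorem pvPrefixDropAppend {xs ys sub : List Char} {q : Nat}
    (h : sub <+: (xs ++ ys).drop q) (hle : q + sub.length ≤ xs.length) :
    sub <+: xs.drop q := by
  rw [List.prefix_iff_eq_take] at h ⊢
  rw [List.drop_append, Nat.sub_eq_zero_of_le (by omega), List.drop_zero,
    List.take_append_of_le_length (by simp; omega)] at h
  exact h

-- an infix of xs ++ [c] is an infix of xs or a suffix of xs ++ [c]
theorem pvInfixSnoc {l xs : List Char} {c : Char} (h : l <:+: xs ++ [c]) :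
    l <:+: xs ∨ l <:+ xs ++ [c] := by
  obtain ⟨u, t, hut⟩ := h
  rcases List.eq_nil_or_concat t with rfl | ⟨t₀, c', rfl⟩
  · right
    exact ⟨u, by simpa using hut⟩
  · left
    have h2 : (u ++ l ++ t₀) ++ [c'] = xs ++ [c] := by
      simpa [List.concat_eq_append, List.append_assoc] using hut
    have h3 : u ++ l ++ t₀ = xs := by
      have := congrArg List.dropLast h2
      simpa [List.dropLast_concat] using this
    exact ⟨u, t₀, h3⟩

-- find points at the stated first occurrence
theorem pvFindEq (cur sub : List Char) (d : Nat) (h1 : sub <+: cur.drop d)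
    (h2 : ∀ q < d, ¬ sub <+: cur.drop q) : PySem.Chars.find cur sub = (d : Int) := by
  have hin : sub <:+: cur := by
    rw [← PySem.Chars.isIn_iff_infix, ← PySem.Chars.exists_prefix_drop_iff_isIn]
    exact ⟨d, h1⟩
  have h0 : 0 ≤ PySem.Chars.find cur sub := (PySem.Chars.find_nonneg_iff cur sub).mpr hin
  obtain ⟨hp, hmin⟩ := PySem.Chars.find_spec h0
  rcases Nat.lt_trichotomy (PySem.Chars.find cur sub).toNat d with h | h | h
  · exact absurd hp (h2 _ h)
  · omega
  · exact absurd h1 (hmin d h)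

-- findFrom with a start past the end returns -1
theorem pvFindFromPast (s sub : List Char) (k : Nat) (hk : s.length < k) :
    PySem.Chars.findFrom s sub (k : Int) none = -1 := by
  simp only [PySem.Chars.findFrom]
  rw [if_neg (by omega : ¬((k : Int) < 0)), if_pos (by omega : (s.length : Int) < (k : Int))]

-- B's marker test is exactly "out' ends with don't()"
theorem pvCondIff (out' : List Char) :
    (7 ≤ out'.length ∧ PySem.List.slice out' (some (-7 : Int)) none = "don't()".toList)
      ↔ "don't()".toList <:+ out' := by
  rw [PySem.List.slice_from_neg_ofNat out' 7 (by omega)]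
  constructor
  · rintro ⟨hlen, hs⟩
    rw [List.suffix_iff_eq_drop]
    have : ("don't()".toList).length = 7 := by decide
    rw [this]
    exact hs.symm
  · intro h
    have hlen := h.length_le
    have h7 : ("don't()".toList).length = 7 := by decide
    rw [List.suffix_iff_eq_drop, h7] at h
    exact ⟨by omega, h.symm⟩

-- the loop with no don't() fully inside its argument-prefix terminates as identity
theorem pvLoopEnd (out : List Char) (hinv : ¬ ("don't()".toList <:+: out)) :
    returnInstructionsLoop out = out := by
  rw [returnInstructionsLoop]
  have hf : PySem.Chars.find out "don't()".toList = -1 :=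
    (PySem.Chars.find_eq_neg_one_iff out "don't()".toList).mpr hinv
  simp only [hf]
  simp

-- core invariant lemma: A on the current spliced string equals B's scan state
theorem pvKey (s : List Char) (n : Nat) : ∀ (i : Nat) (out : List Char),
    s.length - i ≤ n → i ≤ s.length → ¬ ("don't()".toList <:+: out) →
    returnInstructionsLoop (out ++ s.drop i) = returnInstructionsAltLoop s i out := by
  induction n with
  | zero =>
    intro i out hn hi hinv
    have hie : i = s.length := by omega
    subst hie
    rw [returnInstructionsAltLoop]
    simp only [lt_self_iff_false, dite_false]
    rw [List.drop_length, List.append_nil]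
    exact pvLoopEnd out hinv
  | succ n ih =>
    intro i out hn hi hinv
    by_cases hlt : i < s.length
    · -- one character step
      have hcur : out ++ s.drop i = (out ++ [s[i]]) ++ s.drop (i + 1) := by
        rw [← List.getElem_cons_drop hlt, List.append_cons]
      rw [returnInstructionsAltLoop]
      simp only [dif_pos hlt]
      by_cases hsfx : "don't()".toList <:+ out ++ [s[i]]
      · -- marker completed: A splices, B pops and fast-forwards
        rw [if_pos ((pvCondIff _).mpr hsfx)]
        obtain ⟨p, hp⟩ := hsfx
        have hplen : p.length + 7 = out.length + 1 := by
          have := congrArg List.length hp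
          simp at this
          omega
        have hout'' : PySem.List.slice (out ++ [s[i]]) none (some (-7 : Int)) = p := by
          rw [PySem.List.slice_to_neg_ofNat _ 7 (by omega), ← hp]
          have hl : (p ++ "don't()".toList).length - 7 = p.length := by
            simp
          rw [hl, List.take_left]
        have hcur2 : out ++ s.drop i = p ++ ("don't()".toList ++ s.drop (i + 1)) := by
          rw [hcur, ← hp, List.append_assoc]
        -- A's find lands exactly on the completed marker
        have hfind : PySem.Chars.find (out ++ s.drop i) "don't()".toList = (p.length : Int) := by
          apply pvFindEq
          · rw [hcur2, List.drop_append, Nat.sub_self, List.drop_length]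
            simp
          · intro q hq hpre
            have h7 : ("don't()".toList).length = 7 := by decide
            have hq1 : "don't()".toList <+: (out ++ [s[i]]).drop q := by
              apply pvPrefixDropAppend (ys := s.drop (i + 1))
              · rw [← hcur]; exact hpre
              · simp
                omega
            have hq2 : "don't()".toList <+: out.drop q := by
              apply pvPrefixDropAppend (ys := [s[i]])
              · exact hq1
              · simp
                omega
            exact hinv (hq2.isInfix.trans (List.drop_suffix q out).isInfix)
        have hpout : ¬ ("don't()".toList <:+: p) := by
          intro hip
          have hppre : p <+: out := by
            rw [List.prefix_iff_eq_take]
            have : p = List.take p.length (out ++ [s[i]]) := by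
              rw [← hp, List.take_left]
            rwa [List.take_append_of_le_length (by omega : p.length ≤ out.length)] at this
          exact hinv (hip.trans hppre.isInfix)
        rw [returnInstructionsLoop]
        simp only [hfind]
        rw [dif_neg (by omega : ¬ ((p.length : Int) = -1))]
        have h7 : ("don't()".toList).length = 7 := by decide
        have hcopy : PySem.Chars.slice (out ++ s.drop i) (some ((p.length : Int) + 8)) none
            = s.drop (i + 2) := by
          have hc : ((p.length : Int) + 8) = ((p.length + 8 : Nat) : Int) := by push_cast; ring
          rw [hc, PySem.Chars.slice_eq_listSlice, PySem.List.slice_from_natCast, hcur2,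
            List.drop_append, List.drop_eq_nil_of_le (by omega), List.nil_append,
            List.drop_append, List.drop_eq_nil_of_le (by omega), List.nil_append,
            List.drop_drop]
          congr 1
          omega
        have htake : PySem.Chars.slice (out ++ s.drop i) none (some (p.length : Int)) = p := by
          rw [PySem.Chars.slice_eq_listSlice, PySem.List.slice_to_natCast, hcur2, List.take_left]
        rw [hcopy, htake, hout'']
        by_cases hii : i + 2 ≤ s.length
        · have hc2 : ((i : Int) + 2) = ((i + 2 : Nat) : Int) := by push_cast; ring
          have hff := PySem.Chars.findFrom_natCast s "do()".toList (i + 2) hii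
          by_cases hfd : PySem.Chars.find (s.drop (i + 2)) "do()".toList = -1
          · rw [dif_pos hfd, dif_pos (by rw [hc2, hff, if_pos hfd])]
          · have he0 : 0 ≤ PySem.Chars.find (s.drop (i + 2)) "do()".toList := by
              have := PySem.Chars.neg_one_le_find (s.drop (i + 2)) "do()".toList
              omega
            obtain ⟨hep, -⟩ := PySem.Chars.find_spec he0
            obtain ⟨e, heeq⟩ : ∃ e : Nat,
                PySem.Chars.find (s.drop (i + 2)) "do()".toList = (e : Int) :=
              ⟨(PySem.Chars.find (s.drop (i + 2)) "do()".toList).toNat, by omega⟩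
            rw [heeq, Int.toNat_natCast] at hep
            have helen : e + 4 + (i + 2) ≤ s.length := by
              have := hep.length_le
              rw [List.drop_drop, List.length_drop] at this
              have h4 : ("do()".toList).length = 4 := by decide
              omega
            have hjval : PySem.Chars.findFrom s "do()".toList ((i : Int) + 2) none
                = ((i + 2 + e : Nat) : Int) := by
              rw [hc2, hff, if_neg hfd, heeq]
              push_cast
              ring
            have hdropA : PySem.Chars.slice (out ++ s.drop i)
                (some ((p.length : Int) + 7 + PySem.Chars.find (s.drop (i + 2)) "do()".toList + 5)) none
                = s.drop (i + 6 + e) := by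
              rw [heeq]
              have hc3 : ((p.length : Int) + 7 + (e : Int) + 5) = ((p.length + 12 + e : Nat) : Int) := by
                push_cast; ring
              rw [hc3, PySem.Chars.slice_eq_listSlice, PySem.List.slice_from_natCast, hcur2,
                List.drop_append, List.drop_eq_nil_of_le (by omega), List.nil_append,
                List.drop_append, List.drop_eq_nil_of_le (by omega), List.nil_append,
                List.drop_drop]
              congr 1
              omega
            rw [dif_neg hfd, dif_neg (by rw [hjval]; omega), hdropA, hjval]
            simp only [Int.toNat_natCast]
            have h46 : i + 6 + e = i + 2 + e + 4 := by omega
            rw [h46]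
            exact ih (i + 2 + e + 4) p (by omega) (by omega) hpout
        · -- the do()-search starts one past the end of the input: both sides stop with p
          have hie2 : i + 2 = s.length + 1 := by omega
          have hnil : s.drop (i + 2) = [] := List.drop_eq_nil_of_le (by omega)
          have hfd : PySem.Chars.find (s.drop (i + 2)) "do()".toList = -1 := by
            rw [hnil, PySem.Chars.find_eq_neg_one_iff]
            intro hc
            rw [List.infix_nil] at hc
            exact absurd hc (by decide)
          have hpast : PySem.Chars.findFrom s "do()".toList ((i : Int) + 2) none = -1 := by
            have hc2 : ((i : Int) + 2) = ((i + 2 : Nat) : Int) := by push_cast; ring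
            rw [hc2]
            exact pvFindFromPast s "do()".toList (i + 2) (by omega)
          rw [dif_pos hfd, dif_pos hpast]
      · -- ordinary character: push and continue
        rw [if_neg (fun hc => hsfx ((pvCondIff _).mp hc))]
        have hinv' : ¬ ("don't()".toList <:+: out ++ [s[i]]) := by
          intro hin
          rcases pvInfixSnoc hin with h | h
          · exact hinv h
          · exact hsfx h
        rw [hcur]
        exact ih (i + 1) (out ++ [s[i]]) (by omega) (by omega) hinv'
    · have hie : i = s.length := by omega
      subst hie
      rw [returnInstructionsAltLoop]
      simp only [lt_self_iff_false, dite_false]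
      rw [List.drop_length, List.append_nil]
      exact pvLoopEnd out hinv


-- ===== VERDICT (by name: the statement is the Claim_ definition above) =====
theorem returnInstructions_spec : Claim_equal_returnInstructions := by
  intro s _hdom
  unfold Spec_returnInstructions returnInstructions returnInstructions_alt
  congr 1
  have := pvKey s.toList s.toList.length 0 [] (by omega) (by omega) (by simp [List.infix_nil])
  simpa using this
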